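-- pv_equiv track=rewrite | github.com/bountonw/translate | th/PP/04_assets/convert_poetry.py | parse_blockquote_line
-- ===== SOURCE A (Python) =====
-- def parse_blockquote_line(line):
--     """Parse a blockquote line and return (indent_level, content).
--
--     indent_level: 0 for '> text', 1 for '> > text', etc.
--     content: the text after the blockquote markers.
--     """
--     count = 0
--     i = 0
--     while i < len(line):
--         if line[i] == '>':
--             count += 1
--             i += 1
--             # After '>', optionally skip one space
--             if i < len(line) and line[i] == ' ':
--                 i += 1
--         else:
--             break
--     content = line[i:]
--     indent_level = count - 1  # First '>' = level 0
--     return indent_level, content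
-- ===== SOURCE B (Python) =====
-- import re
--
-- _MARKERS = re.compile(r'(?:> ?)*')
--
-- def parse_blockquote_line(line):
--     m = _MARKERS.match(line)
--     count = m.group().count('>')
--     return count - 1, line[m.end():]
-- ===== Notes on version B (the rewrite author's own statement) =====
-- stated objective: idiomatic
-- what changed: Replaces the interleaved count-and-skip index loop with a match-then-tally decomposition: one regex match captures the whole leading marker region, then the marker characters in it are counted and the remainder sliced off.
import Mathlib
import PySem

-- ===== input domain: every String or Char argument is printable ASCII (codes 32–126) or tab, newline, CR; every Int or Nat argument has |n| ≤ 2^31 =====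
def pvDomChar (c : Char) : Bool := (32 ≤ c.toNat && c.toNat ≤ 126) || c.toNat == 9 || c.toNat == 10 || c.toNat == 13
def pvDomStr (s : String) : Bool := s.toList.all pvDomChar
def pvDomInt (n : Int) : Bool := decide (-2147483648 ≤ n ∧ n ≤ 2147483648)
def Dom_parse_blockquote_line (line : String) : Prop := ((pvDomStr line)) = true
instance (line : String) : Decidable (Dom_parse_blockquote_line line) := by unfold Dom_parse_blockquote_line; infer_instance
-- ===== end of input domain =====

-- B replaces A's interleaved count-and-skip index loop with a match-then-tally
-- decomposition: first capture the full leading blockquote-marker region (regex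
-- '(?:> ?)*', ported by hand, exact), then count '>' in it and slice the rest.


-- ===== PORT A =====
-- A's while-loop: index i and counter 'count'; on '>' advance and optionally
-- skip one space, otherwise stop.  Returns (count, i).
def pvLoopA (cs : List Char) (i count : Nat) : Nat × Nat :=
  if h : i < cs.length then
    if cs[i] = '>' then
      let i1 := i + 1
      let i2 := if h2 : i1 < cs.length then (if cs[i1] = ' ' then i1 + 1 else i1) else i1
      pvLoopA cs i2 (count + 1)
    else (count, i)
  else (count, i)
termination_by cs.length - i
decreasing_by
  split <;> (try split) <;> omega

def parse_blockquote_line (line : String) : Int × String :=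
  let cs := line.toList
  let r := pvLoopA cs 0 0
  -- line[i:] with 0 ≤ i ≤ len(line): exact as List.drop
  ((r.1 : Int) - 1, String.mk (cs.drop r.2))

-- ===== PORT B =====
-- Hand port of re.match(r'(?:> ?)*', line): returns (matched prefix, rest).
-- Each iteration consumes one '>' plus at most one following space; exact.
def pvMatchMarkers : List Char → List Char × List Char
  | [] => ([], [])
  | c :: rest =>
    if c = '>' then
      match rest with
      | [] => (['>'], [])
      | s :: rest' =>
        if s = ' ' then
          let p := pvMatchMarkers rest'
          ('>' :: ' ' :: p.1, p.2)
        else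
          let p := pvMatchMarkers (s :: rest')
          ('>' :: p.1, p.2)
    else ([], c :: rest)

def parse_blockquote_line_alt (line : String) : Int × String :=
  let p := pvMatchMarkers line.toList
  let count := p.1.count '>'
  ((count : Int) - 1, String.mk p.2)

-- ===== PRECONDITION & SPEC =====
def Spec_parse_blockquote_line (line : String) (out : Int × String) : Prop := out = parse_blockquote_line_alt line
instance (line : String) (out : Int × String) : Decidable (Spec_parse_blockquote_line line out) := by unfold Spec_parse_blockquote_line; infer_instance

-- ===== CLAIM (what is proved, stated in full; the proofs are below) =====
def Claim_equal_parse_blockquote_line : Prop := ∀ (line : String), Dom_parse_blockquote_line line → Spec_parse_blockquote_line line (parse_blockquote_line line)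

-- ===== LEMMAS AND PROOFS =====

-- Unfolding rule: a head other than '>' matches nothing.
theorem pvMatchMarkers_cons_ne (s : Char) (rest' : List Char) (hs : s ≠ '>') :
    pvMatchMarkers (s :: rest') = ([], s :: rest') := by
  rw [pvMatchMarkers.eq_def]
  split <;> simp_all

-- The matched region plus the rest reassemble the input.
theorem pvMatchMarkers_append : ∀ (cs : List Char), (pvMatchMarkers cs).1 ++ (pvMatchMarkers cs).2 = cs := by
  intro cs
  induction cs using pvMatchMarkers.induct with
  | case1 => rfl
  | case2 => rfl
  | case3 rest' ih => simp [pvMatchMarkers, ih]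
  | case4 s rest' hs ih => simp [pvMatchMarkers, hs, ih]
  | case5 s rest' hs => simp [pvMatchMarkers_cons_ne s rest' hs]

-- A's loop, started at index pre.length into pre ++ suf, adds the number of
-- '>' in the matched region of suf to 'count' and advances i by its length.
theorem pvLoopA_eq_match : ∀ (suf pre : List Char) (count : Nat),
    pvLoopA (pre ++ suf) pre.length count =
      (count + (pvMatchMarkers suf).1.count '>',
       pre.length + (pvMatchMarkers suf).1.length) := by
  intro suf
  induction suf using pvMatchMarkers.induct with
  | case1 =>
    intro pre count
    rw [pvLoopA]
    simp [pvMatchMarkers]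
  | case2 =>
    intro pre count
    rw [pvLoopA]
    have h1 : pre.length < (pre ++ ['>']).length := by simp
    have hg : (pre ++ ['>'])[pre.length]'h1 = '>' := by
      simp [List.getElem_append_right]
    rw [pvLoopA]
    simp [hg, pvMatchMarkers]
  | case3 rest' ih =>
    intro pre count
    rw [pvLoopA]
    have h1 : pre.length < (pre ++ '>' :: ' ' :: rest').length := by simp
    have hg : (pre ++ '>' :: ' ' :: rest')[pre.length]'h1 = '>' := by
      simp [List.getElem_append_right]
    have h2 : pre.length + 1 < (pre ++ '>' :: ' ' :: rest').length := by simp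
    have hg2 : (pre ++ '>' :: ' ' :: rest')[pre.length + 1]'h2 = ' ' := by
      have h : pre.length + 1 - pre.length = 1 := by omega
      simp [List.getElem_append_right, h]
    have hre : pre ++ '>' :: ' ' :: rest' = (pre ++ ['>', ' ']) ++ rest' := by simp
    have hlen : pre.length + 1 + 1 = (pre ++ ['>', ' ']).length := by simp
    have key := ih (pre ++ ['>', ' ']) (count + 1)
    simp only [h1, dif_pos, hg, h2, dif_pos, hg2, if_true]
    rw [hre, hlen, key]
    simp [pvMatchMarkers]
    constructor <;> omega
  | case4 s rest' hs ih =>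
    intro pre count
    rw [pvLoopA]
    have h1 : pre.length < (pre ++ '>' :: s :: rest').length := by simp
    have hg : (pre ++ '>' :: s :: rest')[pre.length]'h1 = '>' := by
      simp [List.getElem_append_right]
    have h2 : pre.length + 1 < (pre ++ '>' :: s :: rest').length := by simp
    have hg2 : (pre ++ '>' :: s :: rest')[pre.length + 1]'h2 = s := by
      have h : pre.length + 1 - pre.length = 1 := by omega
      simp [List.getElem_append_right, h]
    have hre : pre ++ '>' :: s :: rest' = (pre ++ ['>']) ++ s :: rest' := by simp
    have hlen : pre.length + 1 = (pre ++ ['>']).length := by simp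
    have key := ih (pre ++ ['>']) (count + 1)
    simp only [h1, dif_pos, hg, h2, dif_pos, hg2, if_true, if_neg hs]
    rw [hre, hlen, key]
    simp [pvMatchMarkers, hs]
    constructor <;> omega
  | case5 s rest' hs =>
    intro pre count
    rw [pvLoopA]
    have h1 : pre.length < (pre ++ s :: rest').length := by simp
    have hg : (pre ++ s :: rest')[pre.length]'h1 = s := by
      simp [List.getElem_append_right]
    simp [h1, hg, hs, pvMatchMarkers_cons_ne s rest' hs]

-- ===== VERDICT (by name: the statement is the Claim_ definition above) =====
theorem parse_blockquote_line_spec : Claim_equal_parse_blockquote_line := by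
  intro line _
  have h := pvLoopA_eq_match line.toList [] 0
  simp only [Spec_parse_blockquote_line, parse_blockquote_line, parse_blockquote_line_alt]
  simp only [List.nil_append, List.length_nil, Nat.zero_add] at h
  rw [h]
  have hap := pvMatchMarkers_append line.toList
  set p := pvMatchMarkers line.toList
  rw [← hap, List.drop_left]
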